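-- pv_equiv track=rewrite | github.com/ethyl2/code_challenges | cryptoanalysis_word_patterns.py | word_pattern
-- ===== SOURCE A (Python) =====
-- def word_pattern(word: str) -> str:
--     output = ''
--     lookup = {}
--     current_num = 0
--     for character in word:
--         char = character.lower()
--         if char in lookup:
--             output += str(lookup[char]) + '.'
--         else:
--             lookup[char] = current_num
--             output += str(current_num) + '.'
--             current_num += 1
--     return output[:-1]
-- ===== SOURCE B (Python) =====
-- def word_pattern(word: str) -> str:
--     lowered = [c.lower() for c in word]
--     return '.'.join(str(len(set(lowered[:lowered.index(c)]))) for c in lowered)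
-- ===== Notes on version B (the rewrite author's own statement) =====
-- stated objective: alternative
-- what changed: Replaces A's stateful single pass (mutable dict, running counter, trailing-dot trim) by a stateless per-character closed form: each character's number is the count of distinct characters strictly before its first occurrence, computed independently for every position and dot-joined.
import Mathlib
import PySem

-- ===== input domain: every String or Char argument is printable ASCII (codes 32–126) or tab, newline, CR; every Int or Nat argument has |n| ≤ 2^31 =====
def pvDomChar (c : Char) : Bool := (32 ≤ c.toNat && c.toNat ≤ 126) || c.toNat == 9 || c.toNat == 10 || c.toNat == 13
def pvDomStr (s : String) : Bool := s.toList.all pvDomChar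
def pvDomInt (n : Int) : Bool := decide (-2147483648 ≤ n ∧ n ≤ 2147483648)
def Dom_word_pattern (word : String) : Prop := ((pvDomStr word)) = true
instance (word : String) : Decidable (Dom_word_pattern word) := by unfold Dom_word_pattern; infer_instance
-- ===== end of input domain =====

-- B replaces A's stateful pass (mutable dict + counter + trailing-dot trim) by a stateless
-- per-character closed form: each character's number is the count of distinct characters
-- strictly before its first occurrence.  Objective: alternative (not faster).

-- ===== PORT A =====
-- single pass: accumulates (output, lookup, current_num); returns output[:-1]
def word_pattern (word : String) : String :=
  let st := word.toList.foldl
    (fun (st : List Char × PySem.Dict Char Int × Int) character =>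
      let ch := PySem.Chars.lowerChar character
      if st.2.1.contains ch then
        (st.1 ++ PySem.Int.toChars (st.2.1.getD ch 0) ++ ['.'], st.2.1, st.2.2)
      else
        (st.1 ++ PySem.Int.toChars st.2.2 ++ ['.'], st.2.1.insert ch st.2.2, st.2.2 + 1))
    ([], PySem.Dict.empty, 0)
  String.ofList (PySem.Chars.slice st.1 none (some (-1)))

-- ===== PORT B =====
-- lowered = [c.lower() for c in word]; each character rendered independently as
-- len(set(lowered[:lowered.index(c)])); joined with '.'.
-- (lowered.index(c) cannot raise — c is an element of lowered — so it is ported as getD 0)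
def word_pattern_alt (word : String) : String :=
  let lowered := word.toList.map PySem.Chars.lowerChar
  String.ofList (PySem.Chars.join ['.']
    (lowered.map (fun c => PySem.Int.toChars
      ((PySem.Set.ofList (PySem.List.slice lowered none
          (some (((PySem.List.index? lowered c).getD 0 : Nat) : Int)))).length : Int))))

-- ===== PRECONDITION & SPEC =====
def Spec_word_pattern (word : String) (out : String) : Prop := out = word_pattern_alt word
instance (word : String) (out : String) : Decidable (Spec_word_pattern word out) := by unfold Spec_word_pattern; infer_instance

-- ===== CLAIM (what is proved, stated in full; the proofs are below) =====
def Claim_equal_word_pattern : Prop := ∀ (word : String), Dom_word_pattern word → Spec_word_pattern word (word_pattern word)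

-- ===== LEMMAS AND PROOFS =====

-- B's closed form, on the take/Nat side
def pvRank (lw : List Char) (c : Char) : Nat :=
  (PySem.Set.ofList (lw.take ((PySem.List.index? lw c).getD 0))).length

-- the dict A's loop threads, built from the processed (lowered) prefix
def pvDictOf (p : List Char) : PySem.Dict Char Int :=
  p.foldl (fun d c => if d.contains c then d else d.insert c (d.size : Int)) PySem.Dict.empty

lemma pvDictOf_append_singleton (p : List Char) (c : Char) :
    pvDictOf (p ++ [c]) =
      if (pvDictOf p).contains c then pvDictOf p
      else (pvDictOf p).insert c ((pvDictOf p).size : Int) := by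
  simp [pvDictOf, List.foldl_append]

lemma pvDictOf_contains (p : List Char) : ∀ k, (pvDictOf p).contains k = decide (k ∈ p) := by
  induction p using List.reverseRecOn with
  | nil => intro k; simp [pvDictOf]
  | append_singleton p c ih =>
    intro k
    rw [pvDictOf_append_singleton]
    by_cases hc : (pvDictOf p).contains c = true
    · have hcp : c ∈ p := by have := ih c; rw [hc] at this; simpa using this.symm
      rw [if_pos hc, ih k]
      by_cases hk : k = c <;> simp [hk, hcp]
    · rw [if_neg hc, PySem.Dict.contains_insert, ih k]
      by_cases hk : k = c <;> simp [hk]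

lemma pvDictOf_size (p : List Char) :
    (pvDictOf p).size = (PySem.Set.ofList p).length := by
  induction p using List.reverseRecOn with
  | nil => simp [pvDictOf]
  | append_singleton p c ih =>
    rw [pvDictOf_append_singleton, PySem.Set.ofList_append_singleton]
    by_cases hc : c ∈ p
    · have h1 : (pvDictOf p).contains c = true := by rw [pvDictOf_contains]; simpa
      have h2 : (PySem.Set.ofList p).contains c = true := by
        simp [PySem.Set.mem_ofList, hc]
      rw [if_pos h1, PySem.Set.add, if_pos h2, ih]
    · have h1 : (pvDictOf p).contains c = false := by rw [pvDictOf_contains]; simpa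
      have h2 : (PySem.Set.ofList p).contains c = false := by
        simp [PySem.Set.mem_ofList, hc]
      rw [if_neg (by simp [h1]), PySem.Set.add,
        if_neg (by simp [PySem.Set.mem_ofList, hc]), PySem.Dict.size_insert, ih]
      simp [h1]

-- rank only looks at the prefix before the first occurrence, so it is stable under appending
lemma pvRank_stable (p t : List Char) (k : Char) (h : k ∈ p) :
    pvRank (p ++ t) k = pvRank p k := by
  obtain ⟨i, hi⟩ : ∃ i, PySem.List.index? p k = some i :=
    Option.isSome_iff_exists.mp ((PySem.List.index?_isSome_iff p k).mpr h)
  obtain ⟨hlt, -, -⟩ := PySem.List.getElem_of_index?_eq_some hi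
  rw [pvRank, pvRank, PySem.List.index?_append_of_mem t h, hi]
  simp [List.take_append_of_le_length (le_of_lt hlt)]

-- a fresh character's rank is the number of distinct characters before it
lemma pvRank_fresh (p t : List Char) (k : Char) (h : k ∉ p) :
    pvRank (p ++ k :: t) k = (PySem.Set.ofList p).length := by
  have hidx : PySem.List.index? (p ++ k :: t) k = some p.length :=
    (PySem.List.index?_eq_some_iff _ _ _).mpr ⟨p, t, rfl, rfl, h⟩
  rw [pvRank, hidx]
  simp

-- A's dict on a processed prefix p gives exactly B's rank for every key of p
lemma pvDictOf_getD (p : List Char) (k : Char) (h : k ∈ p) :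
    (pvDictOf p).getD k 0 = (pvRank p k : Int) := by
  induction p using List.reverseRecOn with
  | nil => simp at h
  | append_singleton p c ih =>
    rw [pvDictOf_append_singleton]
    by_cases hk : k ∈ p
    · have hst := pvRank_stable p [c] k hk
      by_cases hc : (pvDictOf p).contains c = true
      · rw [if_pos hc, ih hk, hst]
      · have hkc : k ≠ c := by
          rintro rfl
          rw [pvDictOf_contains] at hc; simp [hk] at hc
        rw [if_neg hc, PySem.Dict.getD_insert, if_neg hkc, ih hk, hst]
    · have hkc : k = c := by
        rcases List.mem_append.mp h with h' | h'
        · exact absurd h' hk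
        · simpa using h'
      subst hkc
      have hc : (pvDictOf p).contains k = false := by rw [pvDictOf_contains]; simpa
      rw [if_neg (by simp [hc]), PySem.Dict.getD_insert, if_pos rfl,
        pvDictOf_size, pvRank_fresh p [] k hk]

-- the list of rendered numbers A emits, one per character, dict threaded as A does
def pvParts : List Char → PySem.Dict Char Int → List (List Char)
  | [], _ => []
  | c :: cs, d =>
    let ch := PySem.Chars.lowerChar c
    if d.contains ch then PySem.Int.toChars (d.getD ch 0) :: pvParts cs d
    else PySem.Int.toChars d.size :: pvParts cs (d.insert ch (d.size : Int))

-- A's per-character numbers are exactly B's per-character closed form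
lemma pvParts_eq_rank (cs p : List Char) :
    pvParts cs (pvDictOf p) =
      cs.map (fun ch => PySem.Int.toChars
        ((pvRank (p ++ cs.map PySem.Chars.lowerChar) (PySem.Chars.lowerChar ch) : Nat) : Int)) := by
  induction cs generalizing p with
  | nil => rfl
  | cons c cs ih =>
    rw [show p ++ (c :: cs).map PySem.Chars.lowerChar
        = (p ++ [PySem.Chars.lowerChar c]) ++ cs.map PySem.Chars.lowerChar from by simp,
      List.map_cons]
    by_cases hc : (pvDictOf p).contains (PySem.Chars.lowerChar c) = true
    · have hmem : PySem.Chars.lowerChar c ∈ p := by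
        rw [pvDictOf_contains] at hc; simpa using hc
      have hd : pvDictOf (p ++ [PySem.Chars.lowerChar c]) = pvDictOf p := by
        rw [pvDictOf_append_singleton, if_pos hc]
      have hr : pvRank ((p ++ [PySem.Chars.lowerChar c]) ++ cs.map PySem.Chars.lowerChar)
          (PySem.Chars.lowerChar c) = pvRank p (PySem.Chars.lowerChar c) := by
        rw [List.append_assoc]
        exact pvRank_stable p _ _ hmem
      rw [pvParts, if_pos hc, ← hd, ih]
      congr 1
      rw [hd, pvDictOf_getD p _ hmem, hr]
    · have hmem : PySem.Chars.lowerChar c ∉ p := by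
        rw [pvDictOf_contains] at hc; simpa using hc
      have hd : pvDictOf (p ++ [PySem.Chars.lowerChar c])
          = (pvDictOf p).insert (PySem.Chars.lowerChar c) ((pvDictOf p).size : Int) := by
        rw [pvDictOf_append_singleton, if_neg hc]
      have hr : pvRank ((p ++ [PySem.Chars.lowerChar c]) ++ cs.map PySem.Chars.lowerChar)
          (PySem.Chars.lowerChar c) = (PySem.Set.ofList p).length := by
        rw [List.append_assoc]
        exact pvRank_fresh p _ _ hmem
      rw [pvParts, if_neg (by simp [hc]), ← hd, ih]
      congr 1
      rw [hr, pvDictOf_size]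

-- A's loop body
def pvABody (st : List Char × PySem.Dict Char Int × Int) (character : Char) :
    List Char × PySem.Dict Char Int × Int :=
  let ch := PySem.Chars.lowerChar character
  if st.2.1.contains ch then
    (st.1 ++ PySem.Int.toChars (st.2.1.getD ch 0) ++ ['.'], st.2.1, st.2.2)
  else
    (st.1 ++ PySem.Int.toChars st.2.2 ++ ['.'], st.2.1.insert ch st.2.2, st.2.2 + 1)

-- the invariant current_num = size of lookup characterises A's output as pvParts joined with dots
lemma pvALoop_fst (cs : List Char) (out : List Char) (d : PySem.Dict Char Int) :
    (cs.foldl pvABody (out, d, (d.size : Int))).1 =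
      out ++ (List.map (fun p => p ++ ['.']) (pvParts cs d)).flatten := by
  induction cs generalizing out d with
  | nil => simp [pvParts]
  | cons c cs ih =>
    by_cases hc : d.contains (PySem.Chars.lowerChar c) = true
    · have hb : pvABody (out, d, (d.size : Int)) c =
          (out ++ PySem.Int.toChars (d.getD (PySem.Chars.lowerChar c) 0) ++ ['.'], d, (d.size : Int)) := by
        simp [pvABody, hc]
      rw [List.foldl_cons, hb, ih, pvParts, if_pos hc]
      simp
    · have hsz : ((d.insert (PySem.Chars.lowerChar c) (d.size : Int)).size : Int)
          = (d.size : Int) + 1 := by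
        rw [PySem.Dict.size_insert]
        simp [hc]
      have hb : pvABody (out, d, (d.size : Int)) c =
          (out ++ PySem.Int.toChars (d.size : Int) ++ ['.'],
            d.insert (PySem.Chars.lowerChar c) (d.size : Int),
            ((d.insert (PySem.Chars.lowerChar c) (d.size : Int)).size : Int)) := by
        simp [pvABody, hc, hsz]
      rw [List.foldl_cons, hb, ih, pvParts, if_neg (by simp [hc])]
      simp

-- dropping the trailing '.' of the dot-terminated parts gives the dot-joined parts
lemma pvDropLast_flatten_dot (ps : List (List Char)) :
    (List.map (fun p => p ++ ['.']) ps).flatten.dropLast = PySem.Chars.join ['.'] ps := by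
  induction ps with
  | nil => simp [PySem.Chars.join_nil]
  | cons p ps ih =>
    cases ps with
    | nil => simp [PySem.Chars.join_singleton]
    | cons q qs =>
      rw [PySem.Chars.join_cons_cons, ← ih]
      simp only [List.map_cons, List.flatten_cons]
      exact List.dropLast_append_of_ne_nil (by simp)

-- ===== VERDICT (by name: the statement is the Claim_ definition above) =====
theorem word_pattern_spec : Claim_equal_word_pattern := by
  intro word _
  show String.ofList (PySem.Chars.slice
      (word.toList.foldl pvABody
        ([], PySem.Dict.empty, ((PySem.Dict.empty : PySem.Dict Char Int).size : Int))).1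
      none (some (-1)))
    = String.ofList (PySem.Chars.join ['.']
        ((word.toList.map PySem.Chars.lowerChar).map (fun c => PySem.Int.toChars
          ((PySem.Set.ofList (PySem.List.slice (word.toList.map PySem.Chars.lowerChar) none
              (some (((PySem.List.index? (word.toList.map PySem.Chars.lowerChar) c).getD 0 : Nat) : Int)))).length : Int))))
  rw [pvALoop_fst, List.nil_append, PySem.Chars.slice_eq_listSlice,
    PySem.List.slice_to_neg_one, pvDropLast_flatten_dot]
  have hparts := pvParts_eq_rank word.toList []
  rw [show (pvDictOf [] : PySem.Dict Char Int) = PySem.Dict.empty from rfl,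
    List.nil_append] at hparts
  rw [hparts, List.map_map]
  congr 2
  apply List.map_congr_left
  intro c _
  simp [Function.comp, pvRank, PySem.List.slice_to_natCast]
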